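-- pv_equiv track=rewrite | github.com/mohammad-mehdi-amir/genetic_algorithm_project | main.py | fix_overlap_with_repeats
-- ===== SOURCE A (Python) =====
-- def fix_overlap_with_repeats(child, parent, point1, point2, max_repeats=None):
--
--     if max_repeats is None:
--         return child
--
--     gene_counts = {}
--     for gene in child:
--         if gene in gene_counts:
--             gene_counts[gene] += 1
--         else:
--             gene_counts[gene] = 1
--
--     for i in range(len(child)):
--         if i < point1 or i >= point2:
--             gene = child[i]
--             if gene_counts[gene] > max_repeats:
--                 available_genes = [
--                     g for g in parent if gene_counts.get(g, 0) < max_repeats]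
--                 if available_genes:
--                     replacement = available_genes.pop()
--                     child[i] = replacement
--                     gene_counts[gene] -= 1
--                     gene_counts[replacement] = gene_counts.get(
--                         replacement, 0) + 1
--
--     return child
-- ===== SOURCE B (Python) =====
-- def fix_overlap_with_repeats(child, parent, point1, point2, max_repeats=None):
--     # Different algorithm: instead of rescanning parent for every flagged index,
--     # precompute once (a) need[g] = how many copies of g are over the limit and
--     # (b) a capacity-compressed replacement pool: the distinct parent genes in
--     # order of LAST occurrence (latest first), each with its remaining capacity
--     # m - count(g).  A always picks the available gene with the largest parent
--     # index, an over-limit gene never becomes available again and a picked gene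
--     # never goes over the limit, so consuming this pool front-first (here: from
--     # the end of the reversed list, O(1) per pick) reproduces A's picks exactly.
--     # Mutates child in place, like the original.
--     if max_repeats is None:
--         return child
--     m = max_repeats
--     counts = {}
--     for g in child:
--         counts[g] = counts.get(g, 0) + 1
--     pool = []
--     seen = set()
--     for x in reversed(parent):
--         if x not in seen:
--             seen.add(x)
--             cap = m - counts.get(x, 0)
--             if cap > 0:
--                 pool.append((x, cap))
--     pool.reverse()
--     need = {g: c - m for g, c in counts.items() if c > m}
--     for i in range(len(child)):
--         if point1 <= i < point2:
--             continue
--         g = child[i]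
--         if need.get(g, 0) > 0 and pool:
--             r, cap = pool[-1]
--             child[i] = r
--             need[g] -= 1
--             if cap == 1:
--                 pool.pop()
--             else:
--                 pool[-1] = (r, cap - 1)
--     return child
-- ===== Notes on version B (the rewrite author's own statement) =====
-- stated objective: faster
-- what changed: B replaces A's per-index rescan of parent by data precomputed once: a need dict (copies of each gene over the limit) and a capacity-compressed replacement pool (distinct parent genes ordered by last occurrence, each with capacity m - count); the main loop only consumes the pool in O(1) per pick, which is correct because A always picks the available gene of largest parent index, an over-limit gene never becomes available and a picked gene never exceeds the limit.
import Mathlib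
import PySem

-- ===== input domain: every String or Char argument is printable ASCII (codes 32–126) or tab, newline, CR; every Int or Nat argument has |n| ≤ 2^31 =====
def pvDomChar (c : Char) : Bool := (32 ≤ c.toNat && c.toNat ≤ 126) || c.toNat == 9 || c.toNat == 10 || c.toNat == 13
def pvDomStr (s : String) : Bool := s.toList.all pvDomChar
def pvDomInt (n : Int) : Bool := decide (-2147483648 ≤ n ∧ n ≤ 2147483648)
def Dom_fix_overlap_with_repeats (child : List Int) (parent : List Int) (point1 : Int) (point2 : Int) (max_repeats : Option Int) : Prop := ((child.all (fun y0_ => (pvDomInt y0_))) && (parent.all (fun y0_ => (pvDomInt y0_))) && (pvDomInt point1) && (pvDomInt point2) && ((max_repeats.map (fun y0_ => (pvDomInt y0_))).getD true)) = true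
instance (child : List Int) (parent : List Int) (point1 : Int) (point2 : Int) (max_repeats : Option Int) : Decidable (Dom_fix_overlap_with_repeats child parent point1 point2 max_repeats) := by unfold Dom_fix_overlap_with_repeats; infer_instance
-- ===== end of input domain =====

-- B precomputes once what A recomputes per index: a need dict (copies of each gene
-- over the limit) and a capacity-compressed replacement pool (the distinct parent
-- genes by last occurrence, latest first, each with capacity m - count), then runs
-- one consume-only pass with no inner scan of parent. Python A and B both mutate
-- `child` in place in the same way; the theorem below is about the returned value.

-- ===== PORT A =====
-- the `for gene in child:` counting loop of A
def fixA_counts (child : List Int) : PySem.Dict Int Int :=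
  child.foldl (fun d gene =>
    if d.contains gene then d.modify gene 0 (· + 1)   -- gene_counts[gene] += 1 (key present: exact)
    else d.insert gene 1)
    PySem.Dict.empty

-- the body under `if i < point1 or i >= point2:` of A's main loop,
-- over the state (child, gene_counts)
def fixA_inner (parent : List Int) (m : Int)
    (st : List Int × PySem.Dict Int Int) (i : Int) : List Int × PySem.Dict Int Int :=
  -- gene = child[i]; i is drawn from range(len(child)), so the access never raises
  let gene := PySem.List.pyGetD st.1 i 0
  -- gene_counts[gene]: key present (every element of child was counted), getD exact
  if st.2.getD gene 0 > m then
    let available_genes := parent.filter (fun g => st.2.getD g 0 < m)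
    -- `if available_genes: replacement = available_genes.pop()`
    match PySem.List.pop? available_genes with
    | some pr =>
        let d1 := st.2.modify gene 0 (· - 1)        -- gene_counts[gene] -= 1 (key present)
        (PySem.List.pySetD st.1 i pr.1,             -- child[i] = replacement (i in range)
         d1.insert pr.1 (d1.getD pr.1 0 + 1))       -- gene_counts[replacement] = .get(...,0)+1
    | none => st
  else st

-- one iteration of A's `for i in range(len(child)):` loop
def fixA_step (parent : List Int) (point1 point2 m : Int)
    (st : List Int × PySem.Dict Int Int) (i : Int) : List Int × PySem.Dict Int Int :=
  if i < point1 ∨ point2 ≤ i then fixA_inner parent m st i else st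

def fix_overlap_with_repeats (child : List Int) (parent : List Int) (point1 : Int) (point2 : Int) (max_repeats : Option Int) : List Int :=
  match max_repeats with
  | none => child
  | some m =>
      ((PySem.List.pyRange 0 (child.length : Int) 1).foldl
        (fixA_step parent point1 point2 m) (child, fixA_counts child)).1

-- ===== PORT B =====
-- the `counts[g] = counts.get(g, 0) + 1` counting loop of B
def fixB_counts (child : List Int) : PySem.Dict Int Int :=
  child.foldl (fun d g => d.insert g (d.getD g 0 + 1)) PySem.Dict.empty

-- one iteration of B's pool-building loop over reversed(parent), state (pool, seen)
def fixB_poolStep (m : Int) (counts : PySem.Dict Int Int)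
    (st : List (Int × Int) × PySem.Set Int) (x : Int) : List (Int × Int) × PySem.Set Int :=
  if PySem.Set.contains st.2 x then st
  else
    ((if 0 < m - counts.getD x 0 then st.1 ++ [(x, m - counts.getD x 0)] else st.1),
     PySem.Set.add st.2 x)

-- pool build: loop over reversed(parent), then pool.reverse()
def fixB_pool (m : Int) (counts : PySem.Dict Int Int) (parent : List Int) : List (Int × Int) :=
  ((parent.reverse.foldl (fixB_poolStep m counts) ([], PySem.Set.empty)).1).reverse

-- need = {g: c - m for g, c in counts.items() if c > m}
def fixB_need (m : Int) (counts : PySem.Dict Int Int) : PySem.Dict Int Int :=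
  (counts.items.filter (fun p => decide (m < p.2))).foldl
    (fun d p => d.insert p.1 (p.2 - m)) PySem.Dict.empty

-- one iteration of B's main loop, state (child, need, pool)
def fixB_step (point1 point2 : Int)
    (st : List Int × PySem.Dict Int Int × List (Int × Int)) (i : Int) :
    List Int × PySem.Dict Int Int × List (Int × Int) :=
  if point1 ≤ i ∧ i < point2 then st                 -- `continue`
  else
    let g := PySem.List.pyGetD st.1 i 0              -- g = child[i] (i in range: exact)
    if 0 < st.2.1.getD g 0 ∧ st.2.2 ≠ [] then        -- `if need.get(g, 0) > 0 and pool:`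
      match st.2.2.getLast? with                     -- r, cap = pool[-1]
      | some rc =>
          (PySem.List.pySetD st.1 i rc.1,            -- child[i] = r
           st.2.1.modify g 0 (· - 1),                -- need[g] -= 1 (key present: exact)
           if rc.2 = 1 then st.2.2.dropLast          -- pool.pop()
           else st.2.2.dropLast ++ [(rc.1, rc.2 - 1)])  -- pool[-1] = (r, cap - 1)
      | none => st                                   -- unreachable: pool ≠ []
    else st

def fix_overlap_with_repeats_alt (child : List Int) (parent : List Int) (point1 : Int) (point2 : Int) (max_repeats : Option Int) : List Int :=
  match max_repeats with
  | none => child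
  | some m =>
      let counts := fixB_counts child
      let pool := fixB_pool m counts parent
      let need := fixB_need m counts
      ((PySem.List.pyRange 0 (child.length : Int) 1).foldl
        (fixB_step point1 point2) (child, need, pool)).1

-- ===== PRECONDITION & SPEC =====
def Spec_fix_overlap_with_repeats (child : List Int) (parent : List Int) (point1 : Int) (point2 : Int) (max_repeats : Option Int) (out : List Int) : Prop := out = fix_overlap_with_repeats_alt child parent point1 point2 max_repeats
instance (child : List Int) (parent : List Int) (point1 : Int) (point2 : Int) (max_repeats : Option Int) (out : List Int) : Decidable (Spec_fix_overlap_with_repeats child parent point1 point2 max_repeats out) := by unfold Spec_fix_overlap_with_repeats; infer_instance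

-- ===== CLAIM (what is proved, stated in full; the proofs are below) =====
def Claim_equal_fix_overlap_with_repeats : Prop := ∀ (child : List Int) (parent : List Int) (point1 : Int) (point2 : Int) (max_repeats : Option Int), Dom_fix_overlap_with_repeats child parent point1 point2 max_repeats → Spec_fix_overlap_with_repeats child parent point1 point2 max_repeats (fix_overlap_with_repeats child parent point1 point2 max_repeats)

-- ===== LEMMAS AND PROOFS =====

-- abstraction of one pool entry: a parent gene with its remaining capacity
def fCap (m : Int) (c : PySem.Dict Int Int) (x : Int) : Option (Int × Int) :=
  if c.getD x 0 < m then some (x, m - c.getD x 0) else none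

-- ordered dedup with an explicit seen set (what B's build loop traverses)
def dedupSeen (seen : PySem.Set Int) : List Int → List Int
  | [] => []
  | x :: xs =>
      if PySem.Set.contains seen x then dedupSeen seen xs
      else x :: dedupSeen (PySem.Set.add seen x) xs

-- the two counting loops build the same dict
lemma fix_counts_eq (child : List Int) : fixA_counts child = fixB_counts child := by
  unfold fixA_counts fixB_counts
  apply List.foldl_ext
  intro d g _
  by_cases h : d.contains g
  · simp [h, PySem.Dict.modify]
  · have hf : d.contains g = false := by simpa using h
    have h0 : d.getD g 0 = 0 := PySem.Dict.getD_of_not_contains d 0 hf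
    simp [hf, h0]

-- B's build loop produces exactly the fCap entries of the deduped traversal
lemma pool_build_gen (m : Int) (c : PySem.Dict Int Int) :
    ∀ (l : List Int) (acc : List (Int × Int)) (seen : PySem.Set Int),
    (l.foldl (fixB_poolStep m c) (acc, seen)).1
      = acc ++ (dedupSeen seen l).filterMap (fCap m c) := by
  intro l
  induction l with
  | nil => intro acc seen; simp [dedupSeen]
  | cons x xs ih =>
      intro acc seen
      by_cases h : PySem.Set.contains seen x
      · simp only [List.foldl_cons, fixB_poolStep, if_pos h, dedupSeen, ih]
      · rw [List.foldl_cons]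
        by_cases hcap : 0 < m - c.getD x 0
        · have hsome : fCap m c x = some (x, m - c.getD x 0) := by
            unfold fCap; rw [if_pos (by omega)]
          have hstep : fixB_poolStep m c (acc, seen) x
              = (acc ++ [(x, m - c.getD x 0)], PySem.Set.add seen x) := by
            unfold fixB_poolStep; rw [if_neg h, if_pos hcap]
          rw [hstep, ih, dedupSeen, if_neg h, List.filterMap_cons, hsome]
          simp
        · have hnone : fCap m c x = none := by
            unfold fCap; rw [if_neg (by omega)]
          have hstep : fixB_poolStep m c (acc, seen) x = (acc, PySem.Set.add seen x) := by
            unfold fixB_poolStep; rw [if_neg h, if_neg hcap]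
          rw [hstep, ih, dedupSeen, if_neg h, List.filterMap_cons, hnone]

lemma fixB_pool_reverse (m : Int) (c : PySem.Dict Int Int) (parent : List Int) :
    (fixB_pool m c parent).reverse
      = (dedupSeen PySem.Set.empty parent.reverse).filterMap (fCap m c) := by
  unfold fixB_pool
  rw [List.reverse_reverse, pool_build_gen]
  simp

-- an element kept by dedupSeen occurs in the list and not in seen
lemma mem_dedupSeen : ∀ (l : List Int) (seen : PySem.Set Int) (x : Int),
    x ∈ dedupSeen seen l → x ∈ l ∧ x ∉ seen := by
  intro l
  induction l with
  | nil => intro seen x hx; simp [dedupSeen] at hx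
  | cons y ys ih =>
      intro seen x hx
      by_cases h : PySem.Set.contains seen y
      · rw [dedupSeen, if_pos h] at hx
        have := ih seen x hx
        exact ⟨List.mem_cons_of_mem _ this.1, this.2⟩
      · rw [dedupSeen, if_neg h] at hx
        rcases List.mem_cons.mp hx with rfl | hx'
        · refine ⟨List.mem_cons_self, fun hmem => h ?_⟩
          exact (PySem.Set.contains_iff seen x).mpr hmem
        · have := ih _ x hx'
          refine ⟨List.mem_cons_of_mem _ this.1, fun hmem => this.2 ?_⟩
          exact (PySem.Set.mem_add seen y x).mpr (Or.inl hmem)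

lemma dedupSeen_nodup : ∀ (l : List Int) (seen : PySem.Set Int), (dedupSeen seen l).Nodup := by
  intro l
  induction l with
  | nil => intro seen; simp [dedupSeen]
  | cons y ys ih =>
      intro seen
      by_cases h : PySem.Set.contains seen y
      · rw [dedupSeen, if_pos h]; exact ih seen
      · rw [dedupSeen, if_neg h]
        refine List.nodup_cons.mpr ⟨?_, ih _⟩
        intro hy
        exact (mem_dedupSeen ys _ y hy).2 ((PySem.Set.mem_add seen y y).mpr (Or.inr rfl))

-- find? through dedupSeen: the first satisfier is preserved
lemma find?_dedupSeen (p : Int → Bool) : ∀ (l : List Int) (seen : PySem.Set Int),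
    (∀ x, x ∈ seen → p x = false) →
    (dedupSeen seen l).find? p = l.find? p := by
  intro l
  induction l with
  | nil => intro seen _; simp [dedupSeen]
  | cons y ys ih =>
      intro seen hs
      by_cases h : PySem.Set.contains seen y
      · have hy : p y = false := hs y ((PySem.Set.contains_iff seen y).mp (by simpa using h))
        rw [dedupSeen, if_pos h, List.find?_cons, hy]
        exact ih seen hs
      · rw [dedupSeen, if_neg h]
        cases hp : p y with
        | true => simp [hp]
        | false =>
            rw [List.find?_cons, hp, List.find?_cons, hp]
            apply ih
            intro x hx
            rcases (PySem.Set.mem_add seen y x).mp hx with hmem | rfl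
            · exact hs x hmem
            · exact hp

-- the head of the pool is the first available gene
lemma head?_filterMap_fCap (m : Int) (c : PySem.Dict Int Int) : ∀ (l : List Int),
    (l.filterMap (fCap m c)).head?
      = (l.find? (fun x => decide (c.getD x 0 < m))).map (fun x => (x, m - c.getD x 0)) := by
  intro l
  induction l with
  | nil => simp
  | cons x xs ih =>
      by_cases h : c.getD x 0 < m
      · have hsome : fCap m c x = some (x, m - c.getD x 0) := by unfold fCap; rw [if_pos h]
        rw [List.filterMap_cons_some hsome,
          List.find?_cons_of_pos (by simpa using h)]
        rfl
      · have hnone : fCap m c x = none := by unfold fCap; rw [if_neg h]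
        rw [List.filterMap_cons_none hnone,
          List.find?_cons_of_neg (by simpa using h)]
        exact ih

-- A's `available_genes.pop()` against the last/first available element
lemma pop?_filter_none (l : List Int) (p : Int → Bool) (h : l.reverse.find? p = none) :
    PySem.List.pop? (l.filter p) = none := by
  have hnil : l.filter p = [] := by
    rw [List.filter_eq_nil_iff]
    intro a ha
    simpa using List.find?_eq_none.mp h a (by simpa using ha)
  rw [hnil]; rfl

lemma pop?_filter_some (l : List Int) (p : Int → Bool) (r : Int) (h : l.reverse.find? p = some r) :
    ∃ ys, PySem.List.pop? (l.filter p) = some (r, ys) := by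
  have hl : (l.filter p).getLast? = some r := by rw [List.getLast?_filter]; exact h
  obtain ⟨l', hl'⟩ := List.getLast?_eq_some_iff.mp hl
  exact ⟨l', by rw [hl']; exact PySem.List.pop?_last _ _⟩

-- basic fCap facts
lemma fCap_eq_some {m : Int} {c : PySem.Dict Int Int} {x : Int} {p : Int × Int}
    (h : fCap m c x = some p) : p.1 = x ∧ p.2 = m - c.getD x 0 ∧ c.getD x 0 < m := by
  unfold fCap at h
  by_cases hc : c.getD x 0 < m
  · rw [if_pos hc] at h
    cases h; exact ⟨rfl, rfl, hc⟩
  · rw [if_neg hc] at h; cases h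

-- the counts dict after one pick, pointwise
lemma getD_pick (c : PySem.Dict Int Int) (g r : Int) (hgr : r ≠ g) :
    ∀ y, ((c.modify g 0 (· - 1)).insert r ((c.modify g 0 (· - 1)).getD r 0 + 1)).getD y 0
      = if y = r then c.getD r 0 + 1 else if y = g then c.getD g 0 - 1 else c.getD y 0 := by
  intro y
  rw [PySem.Dict.getD_insert]
  by_cases hy : y = r
  · rw [if_pos hy, if_pos hy, PySem.Dict.getD_modify, if_neg hgr]
  · rw [if_neg hy, if_neg hy, PySem.Dict.getD_modify]

-- one pick updates the pool abstraction exactly as B's in-place pool update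
lemma filterMap_fCap_update (m : Int) (c : PySem.Dict Int Int) (g r cap : Int)
    (hg : m < c.getD g 0) (hgr : r ≠ g) :
    ∀ (order : List Int) (rest : List (Int × Int)), order.Nodup →
    order.filterMap (fCap m c) = (r, cap) :: rest →
    order.filterMap
        (fCap m ((c.modify g 0 (· - 1)).insert r ((c.modify g 0 (· - 1)).getD r 0 + 1)))
      = if cap = 1 then rest else (r, cap - 1) :: rest := by
  have hc' := getD_pick c g r hgr
  intro order
  induction order with
  | nil => intro rest _ h; simp at h
  | cons x xs ih =>
      intro rest hnd h
      have hxs : xs.Nodup := (List.nodup_cons.mp hnd).2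
      have hx_not : x ∉ xs := (List.nodup_cons.mp hnd).1
      cases hfx : fCap m c x with
      | none =>
          rw [List.filterMap_cons_none hfx] at h
          have hxr : x ≠ r := by
            intro hxr
            have hmem : (r, cap) ∈ xs.filterMap (fCap m c) := by rw [h]; simp
            obtain ⟨y, hy_mem, hy⟩ := List.mem_filterMap.mp hmem
            have h1 : r = y := (fCap_eq_some hy).1
            exact hx_not (by rw [hxr, h1]; exact hy_mem)
          have hfx' : fCap m ((c.modify g 0 (· - 1)).insert r ((c.modify g 0 (· - 1)).getD r 0 + 1)) x = none := by
            unfold fCap at hfx ⊢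
            rw [hc' x, if_neg hxr]
            by_cases hxg : x = g
            · rw [if_pos hxg, if_neg (by omega)]
            · rw [if_neg hxg]; exact hfx
          rw [List.filterMap_cons, hfx']
          exact ih rest hxs h
      | some p =>
          rw [List.filterMap_cons_some hfx] at h
          obtain ⟨hp1, hp2, hp3⟩ := fCap_eq_some hfx
          have hpr : p = (r, cap) := (List.cons.injEq _ _ _ _ ▸ h).1
          have hrest : rest = xs.filterMap (fCap m c) := ((List.cons.injEq _ _ _ _ ▸ h).2).symm
          have hrx : r = x := by rw [← hp1, hpr]
          have hcap : cap = m - c.getD x 0 := by rw [← hp2, hpr]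
          have htail : xs.filterMap
              (fCap m ((c.modify g 0 (· - 1)).insert r ((c.modify g 0 (· - 1)).getD r 0 + 1)))
              = xs.filterMap (fCap m c) := by
            apply List.filterMap_congr
            intro y hy
            have hyr : y ≠ r := fun hyr => hx_not (by rw [← hrx, ← hyr]; exact hy)
            unfold fCap
            rw [hc' y, if_neg hyr]
            by_cases hyg : y = g
            · rw [if_pos hyg, if_neg (by omega), if_neg (by subst hyg; omega)]
            · rw [if_neg hyg]
          rw [List.filterMap_cons, htail, ← hrest]
          have hfx' : fCap m ((c.modify g 0 (· - 1)).insert r ((c.modify g 0 (· - 1)).getD r 0 + 1)) x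
              = if cap = 1 then none else some (x, cap - 1) := by
            unfold fCap
            rw [show x = r from hrx.symm] at hcap ⊢
            have hp3' : c.getD r 0 < m := by rw [hrx]; exact hp3
            rw [hc' r, if_pos rfl]
            by_cases h1 : cap = 1
            · rw [if_pos h1, if_neg (by omega)]
            · rw [if_neg h1, if_pos (by omega)]
              have : m - (c.getD r 0 + 1) = cap - 1 := by omega
              rw [this]
          rw [hfx']
          by_cases h1 : cap = 1
          · rw [if_pos h1, if_pos h1]
          · rw [if_neg h1, if_neg h1, hrx]

-- getD after the need-building fold (generic over a nodup key list and value map)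
lemma getD_fold_insert_sub (m g : Int) (v : Int → Int) :
    ∀ (L : List Int) (d : PySem.Dict Int Int), L.Nodup →
    (((L.map (fun k => (k, v k))).filter (fun p => decide (m < p.2))).foldl
        (fun d p => d.insert p.1 (p.2 - m)) d).getD g 0
      = if g ∈ L ∧ m < v g then v g - m else d.getD g 0 := by
  intro L
  induction L with
  | nil => intro d _; simp
  | cons k ks ih =>
      intro d hnd
      have hks : ks.Nodup := (List.nodup_cons.mp hnd).2
      have hk_not : k ∉ ks := (List.nodup_cons.mp hnd).1
      simp only [List.map_cons, List.filter_cons, decide_eq_true_eq, List.mem_cons]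
      by_cases hvk : m < v k
      · rw [if_pos hvk, List.foldl_cons, ih _ hks]
        by_cases hgk : g = k
        · subst hgk
          rw [if_neg (fun h => hk_not h.1), if_pos ⟨Or.inl rfl, hvk⟩,
            PySem.Dict.getD_insert, if_pos rfl]
        · rw [PySem.Dict.getD_insert, if_neg hgk]
          by_cases hg : g ∈ ks ∧ m < v g
          · rw [if_pos hg, if_pos ⟨Or.inr hg.1, hg.2⟩]
          · rw [if_neg hg, if_neg (fun h => hg ⟨h.1.resolve_left hgk, h.2⟩)]
      · rw [if_neg hvk, ih _ hks]
        by_cases hgk : g = k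
        · subst hgk
          rw [if_neg (fun h => hvk h.2), if_neg (fun h => hvk h.2)]
        · by_cases hg : g ∈ ks ∧ m < v g
          · rw [if_pos hg, if_pos ⟨Or.inr hg.1, hg.2⟩]
          · rw [if_neg hg, if_neg (fun h => hg ⟨h.1.resolve_left hgk, h.2⟩)]

-- the initial need dict, pointwise
lemma getD_need_init (m g : Int) (child : List Int) :
    (fixB_need m (fixB_counts child)).getD g 0
      = if g ∈ child ∧ m < (child.count g : Int) then (child.count g : Int) - m else 0 := by
  unfold fixB_need
  have hc : fixB_counts child = PySem.Dict.counter child := by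
    unfold fixB_counts
    exact PySem.Dict.foldl_insert_getD_add_one_eq_counter child
  rw [hc, PySem.Dict.items_counter]
  rw [getD_fold_insert_sub m g (fun k => (child.count k : Int)) (PySem.Set.ofList child)
    PySem.Dict.empty (PySem.Set.nodup_ofList child)]
  rw [PySem.Dict.getD_empty]
  by_cases h : g ∈ child ∧ m < (child.count g : Int)
  · rw [if_pos h, if_pos ⟨(PySem.Set.mem_ofList _ _).mpr h.1, h.2⟩]
  · rw [if_neg h, if_neg (fun hh => h ⟨(PySem.Set.mem_ofList _ _).mp hh.1, hh.2⟩)]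

-- the main loop invariant: A's (child, counts) against B's (child, need, pool)
lemma fix_fold_inv (parent : List Int) (point1 point2 m : Int) :
    ∀ (L : List Int) (a : List Int × PySem.Dict Int Int)
      (b : List Int × PySem.Dict Int Int × List (Int × Int)),
    (∀ i ∈ L, 0 ≤ i ∧ i < (a.1.length : Int)) →
    b.1 = a.1 →
    (∀ g ∈ a.1, m < a.2.getD g 0 → b.2.1.getD g 0 = a.2.getD g 0 - m) →
    (∀ g, a.2.getD g 0 ≤ m → b.2.1.getD g 0 = 0) →
    b.2.2.reverse = (dedupSeen PySem.Set.empty parent.reverse).filterMap (fCap m a.2) →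
    (L.foldl (fixA_step parent point1 point2 m) a).1
      = (L.foldl (fixB_step point1 point2) b).1 := by
  intro L
  induction L with
  | nil =>
      intro a b _ hE _ _ _
      exact hE.symm
  | cons i L ihL =>
      intro a b hidx hE hM1 hM2 hP
      obtain ⟨ac, ad⟩ := a
      obtain ⟨bc, bneed, bpool⟩ := b
      have hE' : bc = ac := hE
      subst hE'
      simp only at hidx hM1 hM2 hP
      have hi : 0 ≤ i ∧ i < (bc.length : Int) := hidx i List.mem_cons_self
      have hidx' : ∀ j ∈ L, 0 ≤ j ∧ j < (bc.length : Int) :=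
        fun j hj => hidx j (List.mem_cons_of_mem _ hj)
      rw [List.foldl_cons, List.foldl_cons]
      by_cases hin : i < point1 ∨ point2 ≤ i
      · -- index outside the crossover segment: both inner bodies run
        have hg : PySem.List.pyGetD bc i 0 ∈ bc :=
          PySem.List.pyGetD_mem bc 0 ⟨by omega, by exact_mod_cast hi.2⟩
        by_cases hpool : bpool = []
        · -- pool empty: B skips, A finds no available gene
          have hflt : (dedupSeen PySem.Set.empty parent.reverse).filterMap (fCap m ad) = [] := by
            rw [← hP, hpool]; rfl
          have hfind : (dedupSeen PySem.Set.empty parent.reverse).find?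
              (fun x => decide (ad.getD x 0 < m)) = none := by
            have hh := head?_filterMap_fCap m ad (dedupSeen PySem.Set.empty parent.reverse)
            rw [hflt] at hh
            cases hf : (dedupSeen PySem.Set.empty parent.reverse).find?
                (fun x => decide (ad.getD x 0 < m)) with
            | none => rfl
            | some r => rw [hf] at hh; simp at hh
          have hfindrev : parent.reverse.find? (fun x => decide (ad.getD x 0 < m)) = none := by
            rw [← find?_dedupSeen _ parent.reverse PySem.Set.empty
              (fun x hx => absurd hx (List.not_mem_nil))]
            exact hfind
          have hA : fixA_step parent point1 point2 m (bc, ad) i = (bc, ad) := by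
            simp only [fixA_step, fixA_inner]
            rw [if_pos hin]
            by_cases hcnt : ad.getD (PySem.List.pyGetD bc i 0) 0 > m
            · rw [if_pos hcnt, pop?_filter_none parent _ hfindrev]
            · rw [if_neg hcnt]
          have hB : fixB_step point1 point2 (bc, bneed, bpool) i = (bc, bneed, bpool) := by
            simp only [fixB_step]
            rw [if_neg (by omega), if_neg (by simp [hpool])]
          rw [hA, hB]
          exact ihL (bc, ad) (bc, bneed, bpool) hidx' rfl hM1 hM2 hP
        · -- pool nonempty: the head of the (reversed) pool is A's pick
          cases hrv : bpool.reverse with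
          | nil => exact absurd (List.reverse_eq_nil_iff.mp hrv) hpool
          | cons rc rest' =>
              have hfm : (dedupSeen PySem.Set.empty parent.reverse).filterMap (fCap m ad)
                  = rc :: rest' := by rw [← hP, hrv]
              have hhead : ((dedupSeen PySem.Set.empty parent.reverse).filterMap
                  (fCap m ad)).head? = some rc := by rw [hfm]; rfl
              rw [head?_filterMap_fCap] at hhead
              obtain ⟨r, hfind, hrc⟩ := Option.map_eq_some_iff.mp hhead
              have hrlt : ad.getD r 0 < m := by simpa using List.find?_some hfind
              have hfindrev : parent.reverse.find? (fun x => decide (ad.getD x 0 < m))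
                  = some r := by
                rw [← find?_dedupSeen _ parent.reverse PySem.Set.empty
                  (fun x hx => absurd hx (List.not_mem_nil))]
                exact hfind
              obtain ⟨ys, hpop⟩ := pop?_filter_some parent _ r hfindrev
              have hlast : bpool.getLast? = some rc := by
                rw [← List.head?_reverse, hrv]; rfl
              have hbp : bpool = rest'.reverse ++ [rc] := by
                rw [← List.reverse_reverse bpool, hrv, List.reverse_cons]
              by_cases hcnt : m < ad.getD (PySem.List.pyGetD bc i 0) 0
              · -- both replace child[i] by r
                have hgr : r ≠ PySem.List.pyGetD bc i 0 := by
                  intro hh; rw [hh] at hrlt; omega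
                have hneedpos : 0 < bneed.getD (PySem.List.pyGetD bc i 0) 0 := by
                  rw [hM1 _ hg hcnt]; omega
                have hA : fixA_step parent point1 point2 m (bc, ad) i
                    = (PySem.List.pySetD bc i r,
                       (ad.modify (PySem.List.pyGetD bc i 0) 0 (· - 1)).insert r
                         ((ad.modify (PySem.List.pyGetD bc i 0) 0 (· - 1)).getD r 0 + 1)) := by
                  simp only [fixA_step, fixA_inner]
                  rw [if_pos hin, if_pos hcnt, hpop]
                have hB : fixB_step point1 point2 (bc, bneed, bpool) i
                    = (PySem.List.pySetD bc i rc.1,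
                       bneed.modify (PySem.List.pyGetD bc i 0) 0 (· - 1),
                       if rc.2 = 1 then bpool.dropLast
                       else bpool.dropLast ++ [(rc.1, rc.2 - 1)]) := by
                  simp only [fixB_step]
                  rw [if_neg (by omega), if_pos ⟨hneedpos, hpool⟩, hlast]
                have hrc1 : rc.1 = r := by rw [← hrc]
                have hrc2 : rc.2 = m - ad.getD r 0 := by rw [← hrc]
                rw [hA, hB, hrc1]
                -- the new states still satisfy the invariant
                apply ihL
                · intro j hj
                  have := hidx' j hj
                  rw [PySem.List.length_pySetD]
                  exact this
                · rfl
                · -- M1 for the new states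
                  intro h hmem hlt
                  rw [getD_pick ad _ r hgr] at hlt ⊢
                  rw [PySem.Dict.getD_modify]
                  rw [PySem.List.pySetD_of_nonneg bc r hi.1] at hmem
                  rcases List.mem_or_eq_of_mem_set hmem with hmem' | rfl
                  · by_cases hhr : h = r
                    · rw [if_pos hhr] at hlt
                      exact absurd hlt (by omega)
                    · by_cases hhg : h = PySem.List.pyGetD bc i 0
                      · subst hhg
                        rw [if_neg hhr, if_pos rfl] at hlt
                        rw [if_neg hhr, if_pos rfl, if_pos rfl]
                        have := hM1 _ hg (by omega)
                        omega
                      · rw [if_neg hhr, if_neg hhg] at hlt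
                        rw [if_neg hhg, if_neg hhr, if_neg hhg]
                        exact hM1 h hmem' hlt
                  · rw [if_pos rfl] at hlt
                    exact absurd hlt (by omega)
                · -- M2 for the new states
                  intro h hle
                  rw [getD_pick ad _ r hgr] at hle
                  rw [PySem.Dict.getD_modify]
                  by_cases hhr : h = r
                  · subst hhr
                    rw [if_pos rfl] at hle
                    rw [if_neg hgr]
                    exact hM2 h (by omega)
                  · by_cases hhg : h = PySem.List.pyGetD bc i 0
                    · subst hhg
                      rw [if_neg hhr, if_pos rfl] at hle
                      rw [if_pos rfl]
                      have := hM1 _ hg hcnt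
                      omega
                    · rw [if_neg hhr, if_neg hhg] at hle
                      rw [if_neg hhg]
                      exact hM2 h hle
                · -- the pool abstraction after one pick
                  have hupd := filterMap_fCap_update m ad (PySem.List.pyGetD bc i 0) r rc.2
                    hcnt hgr (dedupSeen PySem.Set.empty parent.reverse) rest'
                    (dedupSeen_nodup parent.reverse PySem.Set.empty)
                    (by rw [hfm, ← hrc1])
                  rw [hupd, hbp, List.dropLast_concat]
                  by_cases h1 : rc.2 = 1
                  · rw [if_pos h1, if_pos h1, List.reverse_reverse]
                  · rw [if_neg h1, if_neg h1]
                    rw [List.reverse_append, List.reverse_reverse]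
                    rfl
              · -- count within the limit: A's test and B's test are both false
                have hA : fixA_step parent point1 point2 m (bc, ad) i = (bc, ad) := by
                  simp only [fixA_step, fixA_inner]
                  rw [if_pos hin, if_neg hcnt]
                have hB : fixB_step point1 point2 (bc, bneed, bpool) i
                    = (bc, bneed, bpool) := by
                  simp only [fixB_step]
                  rw [if_neg (by omega),
                    if_neg (by rw [hM2 _ (by omega)]; simp)]
                rw [hA, hB]
                exact ihL (bc, ad) (bc, bneed, bpool) hidx' rfl hM1 hM2 hP
      · -- index inside the crossover segment: both skip
        have hA : fixA_step parent point1 point2 m (bc, ad) i = (bc, ad) := by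
          unfold fixA_step; rw [if_neg hin]
        have hB : fixB_step point1 point2 (bc, bneed, bpool) i = (bc, bneed, bpool) := by
          simp only [fixB_step]
          rw [if_pos (by omega)]
        rw [hA, hB]
        exact ihL (bc, ad) (bc, bneed, bpool) hidx' rfl hM1 hM2 hP

-- ===== VERDICT (by name: the statement is the Claim_ definition above) =====
theorem fix_overlap_with_repeats_spec : Claim_equal_fix_overlap_with_repeats := by
  unfold Claim_equal_fix_overlap_with_repeats
  intro child parent point1 point2 max_repeats _hdom
  unfold Spec_fix_overlap_with_repeats
  cases max_repeats with
  | none => rfl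
  | some m =>
      simp only [fix_overlap_with_repeats, fix_overlap_with_repeats_alt]
      apply fix_fold_inv
      · intro i hi
        have := PySem.List.mem_pyRange_one.mp hi
        omega
      · rfl
      · intro g hg hcnt
        rw [fix_counts_eq] at hcnt ⊢
        rw [getD_need_init]
        have hcount : (fixB_counts child).getD g 0 = (child.count g : Int) := by
          unfold fixB_counts
          rw [PySem.Dict.foldl_insert_getD_add_one_eq_counter, PySem.Dict.getD_counter]
        rw [hcount] at hcnt ⊢
        rw [if_pos ⟨hg, hcnt⟩]
      · intro g hcnt
        rw [fix_counts_eq] at hcnt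
        rw [getD_need_init]
        have hcount : (fixB_counts child).getD g 0 = (child.count g : Int) := by
          unfold fixB_counts
          rw [PySem.Dict.foldl_insert_getD_add_one_eq_counter, PySem.Dict.getD_counter]
        rw [hcount] at hcnt
        rw [if_neg (by push_neg; intro _; omega)]
      · rw [fix_counts_eq, fixB_pool_reverse]
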